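-- pv_equiv track=rewrite | github.com/rfdearborn/cross | cross/sentinels/llm_reviewer.py | _dominant_agent
-- ===== SOURCE A (Python) =====
-- from collections import Counter, deque
-- from typing import Any
--
-- def _dominant_agent(events: list[dict[str, Any]]) -> tuple[str, str]:
--     """Return the (agent, session_id) that appears most often in the events."""
--     agents: Counter[str] = Counter()
--     sessions: dict[str, str] = {}  # agent -> most recent session_id
--     for ev in events:
--         agent = ev.get("agent", "")
--         if agent:
--             agents[agent] += 1
--             sid = ev.get("session_id", "")
--             if sid:
--                 sessions[agent] = sid
--     if not agents:
--         return "", ""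
--     top_agent = agents.most_common(1)[0][0]
--     return top_agent, sessions.get(top_agent, "")
-- ===== SOURCE B (Python) =====
-- from collections import Counter
-- from typing import Any
--
--
-- def _dominant_agent(events: list[dict[str, Any]]) -> tuple[str, str]:
--     """Return the (agent, session_id) that appears most often in the events."""
--     agents: Counter[str] = Counter()
--     for ev in events:
--         agent = ev.get("agent", "")
--         if agent:
--             agents[agent] += 1
--     if not agents:
--         return "", ""
--     top_agent = agents.most_common(1)[0][0]
--     # no per-agent sessions map: scan backwards for the top agent's latest session
--     for ev in reversed(events):
--         if ev.get("agent", "") == top_agent: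
--             sid = ev.get("session_id", "")
--             if sid:
--                 return top_agent, sid
--     return top_agent, ""
-- ===== Notes on version B (the rewrite author's own statement) =====
-- stated objective: alternative
-- what changed: Drops the per-agent sessions dict entirely: after counting agents, a targeted backward scan over the events finds the top agent's latest truthy session_id instead of maintaining a sessions map for every agent during the forward pass.
import Mathlib
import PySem

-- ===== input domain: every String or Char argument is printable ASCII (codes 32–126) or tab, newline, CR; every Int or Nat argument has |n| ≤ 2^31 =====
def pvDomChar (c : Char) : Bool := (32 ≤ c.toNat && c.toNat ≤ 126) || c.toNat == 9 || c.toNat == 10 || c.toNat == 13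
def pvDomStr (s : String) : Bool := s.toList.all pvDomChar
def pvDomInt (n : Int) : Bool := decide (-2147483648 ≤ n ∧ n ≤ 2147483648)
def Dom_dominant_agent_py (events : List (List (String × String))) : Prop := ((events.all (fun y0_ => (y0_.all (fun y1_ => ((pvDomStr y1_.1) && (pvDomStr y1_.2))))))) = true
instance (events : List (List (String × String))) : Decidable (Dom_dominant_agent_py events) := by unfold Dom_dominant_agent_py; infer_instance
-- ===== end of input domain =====

-- B drops A's per-agent sessions dict: after the same agent count, a backward scan finds the
-- top agent's latest truthy session_id (alternative decomposition; return value only).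

-- ===== PORT A =====
-- ev.get(key, "") on the event dict (association list, first match)
def pvEvGet (ev : List (String × String)) (k : String) : String :=
  (PySem.Dict.mk ev).getD k ""

-- agents.most_common(1)[0][0]: the first key attaining the maximal count (Counter's
-- stable descending order ⇒ first-insertion tie-break); "" when the counter is empty
-- (both Pythons only call it on a non-empty counter).
def pvMostCommon1 (c : PySem.Dict String Int) : String :=
  match PySem.List.max? c.items (fun p => p.2) with
  | some p => p.1
  | none => ""

-- the body of A's single for-loop, state = (agents, sessions)
def pvStepA (st : PySem.Dict String Int × PySem.Dict String String)
    (ev : List (String × String)) :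
    PySem.Dict String Int × PySem.Dict String String :=
  let agent := pvEvGet ev "agent"
  if agent ≠ "" then
    let agents := st.1.modify agent 0 (· + 1)
    let sid := pvEvGet ev "session_id"
    (agents, if sid ≠ "" then st.2.insert agent sid else st.2)
  else st

def dominant_agent_py (events : List (List (String × String))) : String × String :=
  let st := events.foldl pvStepA (PySem.Dict.empty, PySem.Dict.empty)
  if st.1.size = 0 then ("", "")
  else
    let top_agent := pvMostCommon1 st.1
    (top_agent, st.2.getD top_agent "")

-- ===== PORT B =====
-- B's counting loop: only the Counter, no sessions dict
def pvStepB (d : PySem.Dict String Int) (ev : List (String × String)) :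
    PySem.Dict String Int :=
  let agent := pvEvGet ev "agent"
  if agent ≠ "" then d.modify agent 0 (· + 1) else d

-- B's 'for ev in reversed(events)' loop (argument already reversed)
def pvScanRev (top : String) : List (List (String × String)) → String × String
  | [] => (top, "")
  | ev :: rest =>
    if pvEvGet ev "agent" == top then
      let sid := pvEvGet ev "session_id"
      if sid ≠ "" then (top, sid) else pvScanRev top rest
    else pvScanRev top rest

def dominant_agent_py_alt (events : List (List (String × String))) : String × String :=
  let agents := events.foldl pvStepB PySem.Dict.empty
  if agents.size = 0 then ("", "")
  else
    let top_agent := pvMostCommon1 agents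
    pvScanRev top_agent events.reverse

-- ===== PRECONDITION & SPEC =====
def Spec_dominant_agent_py (events : List (List (String × String))) (out : String × String) : Prop := out = dominant_agent_py_alt events
instance (events : List (List (String × String))) (out : String × String) : Decidable (Spec_dominant_agent_py events out) := by unfold Spec_dominant_agent_py; infer_instance

-- ===== CLAIM (what is proved, stated in full; the proofs are below) =====
def Claim_equal_dominant_agent_py : Prop := ∀ (events : List (List (String × String))), Dom_dominant_agent_py events → Spec_dominant_agent_py events (dominant_agent_py events)

-- ===== LEMMAS AND PROOFS =====

-- 'this event has the top agent and a truthy session_id'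
def pvHit (top : String) (ev : List (String × String)) : Bool :=
  (pvEvGet ev "agent" == top) && (pvEvGet ev "session_id" != "")

-- A's pair fold projects to B's counter fold
theorem pvFold_fst (events : List (List (String × String)))
    (c : PySem.Dict String Int) (s : PySem.Dict String String) :
    (events.foldl pvStepA (c, s)).1 = events.foldl pvStepB c := by
  induction events generalizing c s with
  | nil => rfl
  | cons ev rest ih =>
    simp only [List.foldl_cons, pvStepA, pvStepB]
    split_ifs <;> exact ih _ _

-- the counter fold never creates the key ""
theorem pvFoldB_contains_empty (events : List (List (String × String)))
    (c : PySem.Dict String Int) :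
    (events.foldl pvStepB c).contains "" = c.contains "" := by
  induction events generalizing c with
  | nil => rfl
  | cons ev rest ih =>
    simp only [List.foldl_cons, pvStepB]
    split_ifs with h
    · rw [ih, PySem.Dict.contains_modify]
      have hne : ("" == pvEvGet ev "agent") = false := beq_eq_false_iff_ne.mpr (Ne.symm h)
      simp [hne]
    · exact ih _

-- the top agent is a key of the counter
theorem pvMostCommon1_mem (c : PySem.Dict String Int) (h : c.size ≠ 0) :
    pvMostCommon1 c ∈ c.keys := by
  unfold pvMostCommon1
  cases hm : PySem.List.max? c.items (fun p => p.2) with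
  | none =>
    exact absurd (by simp [PySem.Dict.size, (PySem.List.max?_eq_none_iff _ _).1 hm]) h
  | some p =>
    have hp := PySem.List.max?_mem hm
    simp only [PySem.Dict.keys]
    exact List.mem_map_of_mem hp

-- B's backward scan returns the top agent and the first hit's session_id
theorem pvScanRev_eq_find (top : String) (l : List (List (String × String))) :
    pvScanRev top l =
      (top, match l.find? (pvHit top) with
            | some ev => pvEvGet ev "session_id"
            | none => "") := by
  induction l with
  | nil => rfl
  | cons ev rest ih =>
    rw [pvScanRev, List.find?_cons]
    by_cases ha : pvEvGet ev "agent" == top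
    · by_cases hs : pvEvGet ev "session_id" = ""
      · have : pvHit top ev = false := by simp [pvHit, ha, hs]
        simp [ha, hs, this, ih]
      · have : pvHit top ev = true := by simp [pvHit, ha, hs]
        simp [ha, hs, this]
    · have : pvHit top ev = false := by simp [pvHit, ha]
      simp [ha, this, ih]

-- A's sessions lookup at a non-empty key = the last forward hit = first backward hit
theorem pvSessions_eq_find (top : String) (htop : top ≠ "")
    (events : List (List (String × String)))
    (c : PySem.Dict String Int) (s : PySem.Dict String String) :
    (events.foldl pvStepA (c, s)).2.getD top "" =
      (match events.reverse.find? (pvHit top) with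
       | some ev => pvEvGet ev "session_id"
       | none => s.getD top "") := by
  induction events using List.reverseRecOn generalizing c s with
  | nil => rfl
  | append_singleton es ev ih =>
    rw [List.foldl_append, List.foldl_cons, List.foldl_nil, List.reverse_append,
      List.reverse_singleton, List.singleton_append, List.find?_cons]
    by_cases ha : pvEvGet ev "agent" == top
    · have haeq : pvEvGet ev "agent" = top := beq_iff_eq.mp ha
      by_cases hs : pvEvGet ev "session_id" = ""
      · have hhit : pvHit top ev = false := by simp [pvHit, ha, hs]
        rw [hhit]
        simp only [pvStepA, haeq]
        rw [if_pos htop, if_neg (fun h => h hs)]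
        exact ih c s
      · have hhit : pvHit top ev = true := by simp [pvHit, ha, hs]
        rw [hhit]
        simp only [pvStepA, haeq]
        simp [htop, hs, PySem.Dict.getD_insert_self]
    · have hane : pvEvGet ev "agent" ≠ top := fun he => ha (beq_iff_eq.mpr he)
      have hhit : pvHit top ev = false := by simp [pvHit, ha]
      rw [hhit]
      simp only [pvStepA]
      split_ifs with h1 h2
      · rw [PySem.Dict.getD_insert, if_neg (fun h => hane h.symm)]
        exact ih c s
      · exact ih c s
      · exact ih c s

-- ===== VERDICT (by name: the statement is the Claim_ definition above) =====
theorem dominant_agent_py_spec : Claim_equal_dominant_agent_py := by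
  intro events _hdom
  unfold Spec_dominant_agent_py dominant_agent_py dominant_agent_py_alt
  simp only [pvFold_fst]
  by_cases hsz : (events.foldl pvStepB PySem.Dict.empty).size = 0
  · simp [hsz]
  · have htop : pvMostCommon1 (events.foldl pvStepB PySem.Dict.empty) ≠ "" := by
      intro he
      have hmem := pvMostCommon1_mem _ hsz
      rw [he] at hmem
      have hc : (events.foldl pvStepB PySem.Dict.empty).contains "" = false := by
        rw [pvFoldB_contains_empty]; simp [PySem.Dict.contains_empty]
      rw [PySem.Dict.contains_eq_decide_mem_keys] at hc
      simp only [decide_eq_false_iff_not] at hc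
      exact hc hmem
    simp only [if_neg hsz]
    rw [pvScanRev_eq_find, pvSessions_eq_find _ htop]
    simp [PySem.Dict.getD_empty]
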